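-- pv_equiv track=rewrite | github.com/oustella/coding-exercises | Dynamic Programming/xys.py | particleVelocity
-- ===== SOURCE A (Python) =====
-- def particleVelocity(particles):
--     numStable = 0
--     for i in range(len(particles)-2):
--         for j in range(i+1, len(particles)-1):
--             if particles[i+1] - particles[i] == particles[j+1] - particles[j]:
--                 numStable += 1
--             else:
--                 break
--     return numStable
-- ===== SOURCE B (Python) =====
-- def particleVelocity(particles):
--     diffs = [b - a for a, b in zip(particles, particles[1:])]
--     total = run = 0
--     for prev, cur in zip(diffs, diffs[1:]):
--         if cur == prev:
--             run += 1
--             total += run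
--         else:
--             run = 0
--     return total
-- ===== Notes on version B (the rewrite author's own statement) =====
-- stated objective: faster
-- what changed: Replaced the quadratic nested scan (restarting a streak comparison from every index i) with one linear pass over consecutive differences that maintains a running streak counter and sums its triangular contributions.
import Mathlib
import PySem

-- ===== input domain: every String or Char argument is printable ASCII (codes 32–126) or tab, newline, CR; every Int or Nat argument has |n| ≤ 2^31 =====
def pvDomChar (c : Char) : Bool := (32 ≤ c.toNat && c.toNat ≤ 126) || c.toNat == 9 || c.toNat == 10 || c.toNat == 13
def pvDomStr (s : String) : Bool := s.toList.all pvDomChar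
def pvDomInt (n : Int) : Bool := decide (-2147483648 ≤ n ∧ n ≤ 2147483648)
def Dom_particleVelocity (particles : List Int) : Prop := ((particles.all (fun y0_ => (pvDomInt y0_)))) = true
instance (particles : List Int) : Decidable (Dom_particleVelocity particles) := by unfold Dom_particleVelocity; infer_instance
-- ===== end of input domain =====

-- B replaces A's quadratic nested scan by one linear pass over consecutive differences
-- with a running streak counter (objective: faster, asymptotic). Return value only; no mutation.

-- ===== PORT A =====
-- inner 'for j' loop with break: recursion over the range list, accumulator numStable
def pvInnerA (particles : List Int) (i : Int) : List Int → Int → Int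
  | [], numStable => numStable
  | j :: js, numStable =>
      if PySem.List.pyGetD particles (i + 1) 0 - PySem.List.pyGetD particles i 0
           = PySem.List.pyGetD particles (j + 1) 0 - PySem.List.pyGetD particles j 0 then
        pvInnerA particles i js (numStable + 1)
      else
        numStable  -- break

def particleVelocity (particles : List Int) : Int :=
  (PySem.List.pyRange 0 ((particles.length : Int) - 2) 1).foldl
    (fun numStable i =>
      pvInnerA particles i (PySem.List.pyRange (i + 1) ((particles.length : Int) - 1) 1) numStable)
    0

-- ===== PORT B =====
-- diffs = [b - a for a, b in zip(particles, particles[1:])]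
def pvDiffs (particles : List Int) : List Int :=
  (particles.zip (particles.drop 1)).map (fun ab => ab.2 - ab.1)

-- the single pass over zip(diffs, diffs[1:]) with state (run, total)
def pvLoopB : List (Int × Int) → Int → Int → Int
  | [], _, total => total
  | (prev, cur) :: rest, run, total =>
      if cur = prev then pvLoopB rest (run + 1) (total + (run + 1))
      else pvLoopB rest 0 total

def particleVelocity_alt (particles : List Int) : Int :=
  let diffs := pvDiffs particles
  pvLoopB (diffs.zip (diffs.drop 1)) 0 0

-- ===== PRECONDITION & SPEC =====
def Spec_particleVelocity (particles : List Int) (out : Int) : Prop := out = particleVelocity_alt particles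
instance (particles : List Int) (out : Int) : Decidable (Spec_particleVelocity particles out) := by unfold Spec_particleVelocity; infer_instance

-- ===== CLAIM (what is proved, stated in full; the proofs are below) =====
def Claim_equal_particleVelocity : Prop := ∀ (particles : List Int), Dom_particleVelocity particles → Spec_particleVelocity particles (particleVelocity particles)

-- ===== LEMMAS AND PROOFS =====

-- proof-layer common form: number of leading elements of a list equal to x
def pvStreak (x : Int) : List Int → Int
  | [] => 0
  | y :: ys => if y = x then 1 + pvStreak x ys else 0

-- Σ over suffixes: streak of each head into its tail (head-recursive form of the pair count)
def pvSumA : List Int → Int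
  | [] => 0
  | x :: ys => pvStreak x ys + pvSumA ys

theorem pvSumA_short (l : List Int) (h : l.length ≤ 1) : pvSumA l = 0 := by
  match l, h with
  | [], _ => rfl
  | [x], _ => rfl

-- B's loop, generalized over the current state
theorem pvLoopB_spec (rest : List Int) : ∀ (x run total : Int),
    pvLoopB ((x :: rest).zip rest) run total = total + pvSumA (x :: rest) + run * pvStreak x rest := by
  induction rest with
  | nil => intro x run total; simp [pvLoopB, pvSumA, pvStreak]
  | cons y r ih =>
      intro x run total
      by_cases h : y = x
      · subst h
        simp only [List.zip_cons_cons, pvLoopB]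
        rw [ih]
        simp [pvSumA, pvStreak]
        ring
      · simp only [List.zip_cons_cons, pvLoopB, if_neg h]
        rw [ih]
        simp [pvSumA, pvStreak, h]

theorem pvAlt_eq_sumA (particles : List Int) : particleVelocity_alt particles = pvSumA (pvDiffs particles) := by
  unfold particleVelocity_alt
  cases hd : pvDiffs particles with
  | nil => simp [pvLoopB, pvSumA]
  | cons x rest =>
      simp only [List.drop_one, List.tail_cons]
      rw [pvLoopB_spec]
      simp [pvSumA]

-- diff at index k equals the k-th element of pvDiffs
theorem pvDiff_getD (particles : List Int) (k : Nat) (hk : k < (pvDiffs particles).length) :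
    PySem.List.pyGetD particles ((k : Int) + 1) 0 - PySem.List.pyGetD particles (k : Int) 0
      = (pvDiffs particles).getD k 0 := by
  have hlen : (pvDiffs particles).length = particles.length - 1 := by
    simp [pvDiffs]
  have hk1 : k + 1 < particles.length := by omega
  have hk0 : k < particles.length := by omega
  have h1 : ((k : Int) + 1) = ((k + 1 : Nat) : Int) := by push_cast; ring
  rw [h1, PySem.List.pyGetD_natCast, PySem.List.pyGetD_natCast,
      List.getD_eq_getElem _ _ hk1, List.getD_eq_getElem _ _ hk0,
      List.getD_eq_getElem _ _ hk]
  simp [pvDiffs, List.getElem_zip]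

-- A's inner loop computes the streak of the diff at i over the diffs from index a on
theorem pvInnerA_spec (particles : List Int) (i x : Int)
    (hx : PySem.List.pyGetD particles (i + 1) 0 - PySem.List.pyGetD particles i 0 = x) :
    ∀ (t a : Nat), (pvDiffs particles).length ≤ a + t → ∀ (acc : Int),
      pvInnerA particles i (PySem.List.pyRange (a : Int) ((particles.length : Int) - 1) 1) acc
        = acc + pvStreak x ((pvDiffs particles).drop a) := by
  have hlen : (pvDiffs particles).length = particles.length - 1 := by simp [pvDiffs]
  intro t
  induction t with
  | zero =>
      intro a ha acc
      rw [PySem.List.pyRange_one_eq_nil (by omega)]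
      rw [List.drop_eq_nil_of_le (by omega)]
      simp [pvInnerA, pvStreak]
  | succ t ih =>
      intro a ha acc
      by_cases hm : (pvDiffs particles).length ≤ a
      · rw [PySem.List.pyRange_one_eq_nil (by omega)]
        rw [List.drop_eq_nil_of_le (by omega)]
        simp [pvInnerA, pvStreak]
      · have ham : a < (pvDiffs particles).length := by omega
        rw [PySem.List.pyRange_one_cons (by omega)]
        rw [List.drop_eq_getElem_cons ham]
        simp only [pvInnerA, hx, pvDiff_getD particles a ham,
                   List.getD_eq_getElem _ _ ham, pvStreak]
        by_cases h : (pvDiffs particles)[a] = x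
        · rw [if_pos h.symm, if_pos h]
          have : (a : Int) + 1 = ((a + 1 : Nat) : Int) := by push_cast; ring
          rw [this, ih (a + 1) (by omega)]
          ring
        · rw [if_neg (fun he => h he.symm), if_neg h]
          ring

-- A's outer loop sums the streaks of the suffix of diffs from index a
theorem pvOuter_spec (particles : List Int) :
    ∀ (t a : Nat), (pvDiffs particles).length ≤ a + t + 1 → ∀ (acc : Int),
      (PySem.List.pyRange (a : Int) ((particles.length : Int) - 2) 1).foldl
        (fun numStable i =>
          pvInnerA particles i (PySem.List.pyRange (i + 1) ((particles.length : Int) - 1) 1) numStable)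
        acc
      = acc + pvSumA ((pvDiffs particles).drop a) := by
  have hlen : (pvDiffs particles).length = particles.length - 1 := by simp [pvDiffs]
  intro t
  induction t with
  | zero =>
      intro a ha acc
      rw [PySem.List.pyRange_one_eq_nil (by omega)]
      rw [pvSumA_short _ (by simp; omega)]
      simp
  | succ t ih =>
      intro a ha acc
      by_cases hm : (pvDiffs particles).length ≤ a + 1
      · rw [PySem.List.pyRange_one_eq_nil (by omega)]
        rw [pvSumA_short _ (by simp; omega)]
        simp
      · have ham : a < (pvDiffs particles).length := by omega
        rw [PySem.List.pyRange_one_cons (by omega)]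
        rw [List.foldl_cons]
        have hcast : (a : Int) + 1 = ((a + 1 : Nat) : Int) := by push_cast; ring
        rw [hcast, pvInnerA_spec particles (a : Int) ((pvDiffs particles).getD a 0)
              (pvDiff_getD particles a ham) (particles.length) (a + 1) (by omega)]
        rw [ih (a + 1) (by omega)]
        rw [List.drop_eq_getElem_cons ham]
        simp only [pvSumA, List.getD_eq_getElem _ _ ham]
        ring

-- ===== VERDICT (by name: the statement is the Claim_ definition above) =====
theorem particleVelocity_spec : Claim_equal_particleVelocity := by
  intro particles _
  unfold Spec_particleVelocity
  rw [pvAlt_eq_sumA]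
  unfold particleVelocity
  have h := pvOuter_spec particles ((pvDiffs particles).length) 0 (by omega) 0
  simpa using h
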